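-- pv_equiv track=rewrite | github.com/chunmun/fyp | utils.py | contextwin
-- ===== SOURCE A (Python) =====
-- def contextwin(l, win, left, right):
--     '''
--     win :: int corresponding to the size of the window
--     given a list of indexes composing a sentence
--     it will return a list of list of indexes corresponding
--     to context windows surrounding each word in the sentence
--     '''
--     assert (win % 2) == 1
--     assert win >=1
--     l = list(l)
--
--     lpadded = win//2 * [left] + l + win//2 * [right]
--     out = [ lpadded[i:i+win] for i in range(len(l)) ]
--
--     assert len(out) == len(l)
--     return out
-- ===== SOURCE B (Python) =====
-- def contextwin(l, win, left, right):
--     '''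
--     win :: int corresponding to the size of the window
--     given a list of indexes composing a sentence
--     it will return a list of list of indexes corresponding
--     to context windows surrounding each word in the sentence
--     '''
--     assert (win % 2) == 1
--     assert win >= 1
--     l = list(l)
--
--     n = len(l)
--     k = win // 2
--     out = []
--     for i in range(n):
--         row = []
--         for j in range(i - k, i + k + 1):
--             if j < 0:
--                 row.append(left)
--             elif j >= n:
--                 row.append(right)
--             else:
--                 row.append(l[j])
--         out.append(row)
--     return out
-- ===== Notes on version B (the rewrite author's own statement) =====
-- stated objective: alternative
-- what changed: Replaces the pad-then-slice strategy (building a padded intermediate list and slicing it per position) with direct per-element construction: each window element is computed by a bounds-checked index map (left if j<0, right if j>=len(l), else l[j]), so no padded list is ever materialized.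
import Mathlib
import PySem

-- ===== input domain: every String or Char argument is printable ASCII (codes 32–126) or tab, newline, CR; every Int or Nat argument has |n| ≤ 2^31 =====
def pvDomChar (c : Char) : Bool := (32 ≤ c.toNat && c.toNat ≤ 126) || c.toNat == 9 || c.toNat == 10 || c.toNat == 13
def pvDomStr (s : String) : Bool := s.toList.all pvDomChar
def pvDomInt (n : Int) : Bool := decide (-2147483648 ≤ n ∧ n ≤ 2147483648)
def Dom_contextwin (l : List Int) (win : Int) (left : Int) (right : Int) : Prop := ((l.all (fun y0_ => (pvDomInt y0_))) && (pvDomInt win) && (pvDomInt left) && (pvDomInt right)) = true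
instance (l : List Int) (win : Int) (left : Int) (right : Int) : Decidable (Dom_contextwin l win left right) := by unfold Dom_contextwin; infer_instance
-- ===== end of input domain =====

-- B builds each window element directly by a bounds-checked index map instead of
-- padding the list and slicing it; equal cost, no padded intermediate (objective: alternative).

-- ===== PORT A =====
-- lpadded = win//2 * [left] + l + win//2 * [right]; out = [lpadded[i:i+win] for i in range(len(l))]
-- (the asserts raise outside Pre_; inside Pre_ they pass, so the port is the post-assert body)
def contextwin (l : List Int) (win : Int) (left : Int) (right : Int) : List (List Int) :=
  let lpadded : List Int :=
    List.replicate (PySem.Int.floordiv win 2).toNat left ++ l ++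
      List.replicate (PySem.Int.floordiv win 2).toNat right
  (PySem.List.pyRange 0 (l.length : Int) 1).map
    (fun i => PySem.List.slice lpadded (some i) (some (i + win)))

-- ===== PORT B =====
-- for i in range(n): for j in range(i-k, i+k+1): left if j<0, right if j>=n, else l[j]
-- (l.getD j.toNat 0 is exact for l[j] here: the branch guards give 0 ≤ j < len l)
def contextwin_alt (l : List Int) (win : Int) (left : Int) (right : Int) : List (List Int) :=
  let n : Int := l.length
  let k : Int := PySem.Int.floordiv win 2
  (PySem.List.pyRange 0 n 1).map (fun i =>
    (PySem.List.pyRange (i - k) (i + k + 1) 1).map (fun j =>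
      if j < 0 then left else if j ≥ n then right else l.getD j.toNat 0))

-- ===== PRECONDITION & SPEC =====
-- Pre_: exactly the inputs passing A's asserts (win odd and win >= 1); elsewhere A raises AssertionError.
def Pre_contextwin (l : List Int) (win : Int) (left : Int) (right : Int) : Prop :=
  PySem.Int.mod win 2 = 1 ∧ 1 ≤ win
instance (l : List Int) (win : Int) (left : Int) (right : Int) : Decidable (Pre_contextwin l win left right) := by unfold Pre_contextwin; infer_instance
def pvWitness_contextwin : List Int × Int × Int × Int := ([1, 2, 3], 3, -1, -2)

def Spec_contextwin (l : List Int) (win : Int) (left : Int) (right : Int) (out : List (List Int)) : Prop := out = contextwin_alt l win left right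
instance (l : List Int) (win : Int) (left : Int) (right : Int) (out : List (List Int)) : Decidable (Spec_contextwin l win left right out) := by unfold Spec_contextwin; infer_instance

-- ===== CLAIM (what is proved, stated in full; the proofs are below) =====
def Claim_equal_contextwin : Prop := ∀ (l : List Int) (win : Int) (left : Int) (right : Int), Dom_contextwin l win left right → Pre_contextwin l win left right → Spec_contextwin l win left right (contextwin l win left right)

-- ===== LEMMAS AND PROOFS =====

-- One window: the slice of the padded list equals B's bounds-checked map.
theorem contextwin_window_eq (l : List Int) (left right : Int) (k' : Nat) (i : Int)
    (hi0 : 0 ≤ i) (hin : i < (l.length : Int)) :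
    PySem.List.slice
      (List.replicate k' left ++ l ++ List.replicate k' right)
      (some i) (some (i + (2 * (k' : Int) + 1)))
    = (PySem.List.pyRange (i - (k' : Int)) (i + (k' : Int) + 1) 1).map
        (fun j => if j < 0 then left else if j ≥ (l.length : Int) then right
                  else l.getD j.toNat 0) := by
  rw [PySem.List.slice_toNat _ hi0 (by omega), PySem.List.pyRange_one, List.map_map]
  apply List.ext_getElem
  · simp [List.length_replicate]
    omega
  · intro t h1 h2
    simp only [List.getElem_take, List.getElem_drop, List.getElem_map, List.getElem_range,
      Function.comp]
    simp only [List.getElem_append, List.getElem_replicate, List.length_append,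
      List.length_replicate, List.length_take, List.length_drop, List.length_map,
      List.length_range] at h1 h2 ⊢
    split_ifs <;>
      simp_all [List.getD_eq_getElem?_getD] <;>
      first
        | omega
        | (exact getElem_congr_idx (by omega))

-- ===== VERDICT (by name: the statement is the Claim_ definition above) =====
theorem contextwin_spec : Claim_equal_contextwin := by
  intro l win left right _hDom hPre
  obtain ⟨hmod, hwin⟩ := hPre
  unfold Spec_contextwin contextwin contextwin_alt
  have hfd : PySem.Int.floordiv win 2 = win / 2 :=
    PySem.Int.floordiv_eq_ediv_of_pos (by omega)
  have hmd : PySem.Int.mod win 2 = win % 2 :=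
    PySem.Int.mod_eq_emod_of_pos (by omega)
  rw [hmd] at hmod
  set k : Int := win / 2 with hk
  have hk0 : 0 ≤ k := by positivity
  have hwk : win = 2 * k + 1 := by omega
  have hkt : ((k.toNat : Int)) = k := Int.toNat_of_nonneg hk0
  simp only [hfd]
  apply List.map_congr_left
  intro i hi
  rw [PySem.List.mem_pyRange_one] at hi
  have := contextwin_window_eq l left right k.toNat i hi.1 hi.2
  rw [hkt] at this
  rw [← hwk] at this
  exact this
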